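-- pv_equiv track=rewrite | github.com/trca831/python_homework | assignment1/assignment1.py | titleize
-- ===== SOURCE A (Python) =====
-- def titleize(title_string):
--     little_words = ["a", "on", "an", "the", "of", "and", "is", "in"]
--     words = title_string.split()
--     result = []
--
--     for i, word in enumerate(words):
--         if i == 0 or i == len(words) - 1:
--             result.append(word.capitalize())  # Always capitalize first and last
--         elif word.lower() in little_words:
--             result.append(word.lower())       # Keep little words lowercase
--         else:
--             result.append(word.capitalize())  # Capitalize other words
--
--     return " ".join(result)
-- ===== SOURCE B (Python) =====
-- LITTLE = {"a", "on", "an", "the", "of", "and", "is", "in"}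
--
--
-- def _tail_part(ws):
--     # ws is a non-empty list of the words after the first one.
--     # The singleton base case IS the last word: always capitalized.
--     # Interior words are lowered when little, capitalized otherwise.
--     # Builds the joined string directly by recursion (no list, no join).
--     head, *rest = ws
--     if not rest:
--         return head.capitalize()
--     low = head.lower()
--     return (low if low in LITTLE else head.capitalize()) + " " + _tail_part(rest)
--
--
-- def titleize(title_string):
--     words = title_string.split()
--     if not words:
--         return ""
--     first, *rest = words
--     if not rest:
--         return first.capitalize()
--     return first.capitalize() + " " + _tail_part(rest)
-- ===== Notes on version B (the rewrite author's own statement) =====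
-- stated objective: alternative
-- what changed: A builds a list in one indexed loop (enumerate, i==0 / i==len-1 checks) and joins it; B has no indices and no list/join at all: it splits off the first word, then a structural recursion over the remaining words concatenates the result string directly, with the singleton base case being the always-capitalized last word.
import Mathlib
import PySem

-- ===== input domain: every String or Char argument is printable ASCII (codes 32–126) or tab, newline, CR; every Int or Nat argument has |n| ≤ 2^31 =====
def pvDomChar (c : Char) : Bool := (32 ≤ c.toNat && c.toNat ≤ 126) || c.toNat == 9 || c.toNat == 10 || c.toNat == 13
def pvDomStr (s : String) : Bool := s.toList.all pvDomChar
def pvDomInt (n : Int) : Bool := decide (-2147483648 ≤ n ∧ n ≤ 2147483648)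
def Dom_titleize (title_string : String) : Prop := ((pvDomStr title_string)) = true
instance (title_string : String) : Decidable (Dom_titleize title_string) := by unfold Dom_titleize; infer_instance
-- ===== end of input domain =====

-- B replaces A's indexed loop + list + join with an index-free structural recursion that
-- concatenates the result string directly (singleton base case = the last word);
-- objective: alternative decomposition (not faster).

-- str.capitalize (exact on ASCII): first char upper-cased, the rest lower-cased
def pvCap (w : String) : String :=
  match w.toList with
  | [] => ""
  | c :: cs => String.ofList (PySem.Chars.upperChar c :: PySem.Chars.lower cs)

-- ===== PORT A =====
def titleize (title_string : String) : String :=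
  let little_words : List String := ["a", "on", "an", "the", "of", "and", "is", "in"]
  let words := PySem.Str.split₀ title_string
  let result := (PySem.List.enumerate words).foldl (fun acc iw =>
    if iw.1 == 0 || iw.1 == (words.length : Int) - 1 then acc ++ [pvCap iw.2]
    else if little_words.contains (PySem.Str.lower iw.2) then acc ++ [PySem.Str.lower iw.2]
    else acc ++ [pvCap iw.2]) []
  PySem.Str.join " " result

-- ===== PORT B =====
def pvLittle : PySem.Set String :=
  PySem.Set.ofList ["a", "on", "an", "the", "of", "and", "is", "in"]

-- Python str '+' (exact): concatenation, done through the char lists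
def pvConcat (a b : String) : String := String.ofList (a.toList ++ b.toList)

-- _tail_part: recursion over the words after the first; the singleton base case is the
-- always-capitalized last word; interior words lowered when little, capitalized otherwise
def pvTailPart : List String → String
  | [] => ""            -- unreachable: _tail_part is only called on non-empty lists
  | [w] => pvCap w
  | w :: w' :: ws =>
    let low := PySem.Str.lower w
    pvConcat (pvConcat (if low ∈ pvLittle then low else pvCap w) " ") (pvTailPart (w' :: ws))

def titleize_alt (title_string : String) : String :=
  match PySem.Str.split₀ title_string with
  | [] => ""
  | [first] => pvCap first
  | first :: w :: rest => pvConcat (pvConcat (pvCap first) " ") (pvTailPart (w :: rest))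

-- ===== PRECONDITION & SPEC =====
def Spec_titleize (title_string : String) (out : String) : Prop := out = titleize_alt title_string
instance (title_string : String) (out : String) : Decidable (Spec_titleize title_string out) := by unfold Spec_titleize; infer_instance

-- ===== CLAIM (what is proved, stated in full; the proofs are below) =====
def Claim_equal_titleize : Prop := ∀ (title_string : String), Dom_titleize title_string → Spec_titleize title_string (titleize title_string)

-- ===== LEMMAS AND PROOFS =====

-- the uniform interior transform, and B's structural list of result words
def pvUni (w : String) : String :=
  if ["a", "on", "an", "the", "of", "and", "is", "in"].contains (PySem.Str.lower w)
  then PySem.Str.lower w else pvCap w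

def pvListB : List String → List String
  | [] => []
  | [w] => [pvCap w]
  | w :: w' :: ws => pvUni w :: pvListB (w' :: ws)

theorem pv_mem_little (w : String) :
    (w ∈ pvLittle) ↔ (["a", "on", "an", "the", "of", "and", "is", "in"].contains w = true) := by
  simp [pvLittle, PySem.Set.mem_ofList]

theorem pvListB_length (ws : List String) : (pvListB ws).length = ws.length := by
  induction ws with
  | nil => rfl
  | cons w t ih => cases t with
    | nil => rfl
    | cons w' t' => simpa [pvListB] using ih

theorem pvListB_getElem (ws : List String) (k : Nat) (hk : k < ws.length)
    (hk' : k < (pvListB ws).length) :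
    (pvListB ws)[k] = if k = ws.length - 1 then pvCap ws[k] else pvUni ws[k] := by
  induction ws generalizing k with
  | nil => simp at hk
  | cons w t ih =>
    cases t with
    | nil =>
        have hk0 : k = 0 := by simpa using hk
        subst hk0; simp [pvListB]
    | cons w' t' =>
      cases k with
      | zero => simp [pvListB]
      | succ j =>
        have hj : j < (w' :: t').length := by simpa using hk
        have hj' : j < (pvListB (w' :: t')).length := by
          rw [pvListB_length]; exact hj
        simp only [pvListB, List.getElem_cons_succ]
        rw [ih j hj hj']
        simp only [List.length_cons]
        by_cases h : j = t'.length <;> simp [h]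

-- A's fold produces exactly pvCap w0 :: pvListB ws on words = w0 :: ws
theorem pv_foldA_eq (words : List String) (w0 : String) (ws : List String)
    (hw : words = w0 :: ws) :
    ((PySem.List.enumerate words).foldl (fun acc iw =>
      if iw.1 == 0 || iw.1 == (words.length : Int) - 1 then acc ++ [pvCap iw.2]
      else if ["a", "on", "an", "the", "of", "and", "is", "in"].contains (PySem.Str.lower iw.2) then acc ++ [PySem.Str.lower iw.2]
      else acc ++ [pvCap iw.2]) [])
    = pvCap w0 :: pvListB ws := by
  have hA : ((PySem.List.enumerate words).foldl (fun acc iw =>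
      if iw.1 == 0 || iw.1 == (words.length : Int) - 1 then acc ++ [pvCap iw.2]
      else if ["a", "on", "an", "the", "of", "and", "is", "in"].contains (PySem.Str.lower iw.2) then acc ++ [PySem.Str.lower iw.2]
      else acc ++ [pvCap iw.2]) [])
      = (PySem.List.enumerate words).map (fun iw =>
        if iw.1 == 0 || iw.1 == (words.length : Int) - 1 then pvCap iw.2
        else if ["a", "on", "an", "the", "of", "and", "is", "in"].contains (PySem.Str.lower iw.2) then PySem.Str.lower iw.2
        else pvCap iw.2) := by
    induction (PySem.List.enumerate words) using List.reverseRecOn with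
    | nil => rfl
    | append_singleton xs x ih =>
      simp only [List.foldl_append, List.foldl_cons, List.foldl_nil, List.map_append,
        List.map_cons, List.map_nil, ih]
      split_ifs <;> simp
  rw [hA]
  apply List.ext_getElem
  · simp [PySem.List.length_enumerate, pvListB_length, hw]
  intro k hk1 hk2
  have hklt : k < words.length := by
    simpa [PySem.List.length_enumerate] using hk1
  rw [List.getElem_map, PySem.List.getElem_enumerate]
  subst hw
  cases k with
  | zero => simp
  | succ j =>
    have hj : j < ws.length := by simpa using hklt
    have hj' : j < (pvListB ws).length := by rw [pvListB_length]; exact hj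
    simp only [List.getElem_cons_succ]
    rw [pvListB_getElem ws j hj hj']
    simp only [List.length_cons, pvUni, Bool.or_eq_true, beq_iff_eq]
    split_ifs <;> first | rfl | omega

-- B's recursive string is the " "-join of its structural word list
theorem pv_join_cons (sep p : List Char) (l : List (List Char)) (h : l ≠ []) :
    PySem.Chars.join sep (p :: l) = p ++ sep ++ PySem.Chars.join sep l := by
  cases l with
  | nil => exact absurd rfl h
  | cons q r => exact PySem.Chars.join_cons_cons sep p q r

theorem pvListB_ne_nil (ws : List String) (h : ws ≠ []) : pvListB ws ≠ [] := by
  cases ws with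
  | nil => exact absurd rfl h
  | cons w t => cases t <;> simp [pvListB]

theorem pvTailPart_toList (ws : List String) (hne : ws ≠ []) :
    (pvTailPart ws).toList = PySem.Chars.join " ".toList ((pvListB ws).map String.toList) := by
  induction ws with
  | nil => exact absurd rfl hne
  | cons w t ih =>
    cases t with
    | nil => simp [pvTailPart, pvListB, PySem.Chars.join_singleton]
    | cons w' t' =>
      simp only [pvTailPart, pvListB, List.map_cons, pvConcat,
        String.toList_ofList, ih (by simp), pvUni]
      rw [pv_join_cons _ _ _ (by simp [pvListB_ne_nil (w' :: t') (by simp)])]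
      by_cases h : PySem.Str.lower w ∈ pvLittle
      · rw [if_pos h, if_pos ((pv_mem_little _).mp h)]
      · rw [if_neg h, if_neg (fun hc => h ((pv_mem_little _).mpr hc))]

-- ===== VERDICT (by name: the statement is the Claim_ definition above) =====
theorem titleize_spec : Claim_equal_titleize := by
  intro s _
  unfold Spec_titleize titleize titleize_alt
  apply String.toList_inj.mp
  cases hw : PySem.Str.split₀ s with
  | nil => simp [PySem.Str.toList_join, PySem.Chars.join_nil]
  | cons w0 ws =>
    rw [PySem.Str.toList_join, pv_foldA_eq (w0 :: ws) w0 ws rfl]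
    cases ws with
    | nil => simp [pvListB, PySem.Chars.join_singleton]
    | cons w1 t =>
      simp only [List.map_cons]
      rw [pv_join_cons _ _ _ (by simp [pvListB_ne_nil (w1 :: t) (by simp)]),
        ← pvTailPart_toList (w1 :: t) (by simp)]
      simp [pvConcat, List.append_assoc]
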